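-- pv_equiv track=rewrite | github.com/Sagura091/Agentic-Ai-Engine | app/tools/metadata/parameter_generator.py | match_enum_values
-- ===== SOURCE A (Python) =====
-- from typing import Dict, List, Any, Optional, Union
--
-- def match_enum_values(text: str, enum_values: List[str]) -> Optional[str]:
--     """Find the best matching enum value from text."""
--     text_lower = text.lower()
--
--     # Exact match first
--     for value in enum_values:
--         if value.lower() in text_lower:
--             return value
--
--     # Partial match
--     for value in enum_values:
--         if any(word in text_lower for word in value.lower().split('_')):
--             return value
--
--     return None
-- ===== SOURCE B (Python) =====
-- def match_enum_values(text, enum_values):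
--     """Find the best matching enum value from text (single fused pass)."""
--     text_lower = text.lower()
--     full = None
--     partial = None
--     for value in enum_values:
--         vl = value.lower()
--         if full is None and vl in text_lower:
--             full = value
--         if partial is None and any(word in text_lower for word in vl.split('_')):
--             partial = value
--     return full if full is not None else partial
-- ===== Notes on version B (the rewrite author's own statement) =====
-- stated objective: alternative
-- what changed: The two priority scans (full-substring match, then '_'-word partial match) are fused into one pass that tracks the first match of each kind and picks the full one afterwards, so the list is traversed once instead of up to twice.
import Mathlib
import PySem

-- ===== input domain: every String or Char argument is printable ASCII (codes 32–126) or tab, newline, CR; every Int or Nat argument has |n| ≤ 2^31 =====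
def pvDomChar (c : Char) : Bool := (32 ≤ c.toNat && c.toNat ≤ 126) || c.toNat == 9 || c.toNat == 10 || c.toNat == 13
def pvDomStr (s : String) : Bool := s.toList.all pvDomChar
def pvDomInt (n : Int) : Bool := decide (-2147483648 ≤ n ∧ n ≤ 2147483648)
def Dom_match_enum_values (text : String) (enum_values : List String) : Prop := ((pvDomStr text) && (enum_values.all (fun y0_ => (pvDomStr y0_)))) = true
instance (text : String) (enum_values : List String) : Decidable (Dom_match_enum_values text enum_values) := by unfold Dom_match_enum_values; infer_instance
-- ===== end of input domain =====

-- B fuses A's two priority scans into one pass (alternative decomposition, same asymptotic cost).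

-- ===== PORT A =====
-- A: first scan for a value whose lowercase form is a substring of text_lower,
-- then a second scan for a value one of whose '_'-words is a substring; else None.
def match_enum_values (text : String) (enum_values : List String) : Option String :=
  let tl := PySem.Str.lower text
  match enum_values.find? (fun v => PySem.Str.isIn (PySem.Str.lower v) tl) with
  | some v => some v
  | none =>
      enum_values.find? (fun v =>
        (((PySem.Str.split? (PySem.Str.lower v) "_").getD [])).any (fun w => PySem.Str.isIn w tl))

-- ===== PORT B =====
-- B: one fold carrying (first full match, first word-part match); full match wins at the end.
def match_enum_values_alt (text : String) (enum_values : List String) : Option String :=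
  let tl := PySem.Str.lower text
  let st := enum_values.foldl (fun (st : Option String × Option String) v =>
      let vl := PySem.Str.lower v
      let f := if st.1.isNone && PySem.Str.isIn vl tl then some v else st.1
      let p := if st.2.isNone && (((PySem.Str.split? vl "_").getD [])).any (fun w => PySem.Str.isIn w tl)
               then some v else st.2
      (f, p)) (none, none)
  match st.1 with
  | some v => some v
  | none => st.2

-- ===== PRECONDITION & SPEC =====
def Spec_match_enum_values (text : String) (enum_values : List String) (out : Option String) : Prop := out = match_enum_values_alt text enum_values
instance (text : String) (enum_values : List String) (out : Option String) : Decidable (Spec_match_enum_values text enum_values out) := by unfold Spec_match_enum_values; infer_instance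

-- ===== CLAIM (what is proved, stated in full; the proofs are below) =====
def Claim_equal_match_enum_values : Prop := ∀ (text : String) (enum_values : List String), Dom_match_enum_values text enum_values → Spec_match_enum_values text enum_values (match_enum_values text enum_values)

-- ===== LEMMAS AND PROOFS =====

-- The fused fold computes, componentwise, "already found" or else the first match of each scan.
theorem mev_fold_eq (q1 q2 : String → Bool) (l : List String) :
    ∀ f p : Option String,
      l.foldl (fun (st : Option String × Option String) v =>
        (if st.1.isNone && q1 v then some v else st.1,
         if st.2.isNone && q2 v then some v else st.2)) (f, p)
      = (f.orElse (fun _ => l.find? q1), p.orElse (fun _ => l.find? q2)) := by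
  induction l with
  | nil => intro f p; cases f <;> cases p <;> simp [Option.orElse]
  | cons v t ih =>
      intro f p
      simp only [List.foldl_cons, List.find?]
      rw [ih]
      cases f <;> cases p <;> by_cases h1 : q1 v <;> by_cases h2 : q2 v <;>
        simp [h1, h2, Option.orElse]

theorem mev_alt_eq (text : String) (enum_values : List String) :
    match_enum_values_alt text enum_values = match_enum_values text enum_values := by
  unfold match_enum_values_alt match_enum_values
  simp only []
  rw [show (fun (st : Option String × Option String) v =>
        let vl := PySem.Str.lower v
        let f := if st.1.isNone && PySem.Str.isIn vl (PySem.Str.lower text) then some v else st.1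
        let p := if st.2.isNone && (((PySem.Str.split? vl "_").getD [])).any
                    (fun w => PySem.Str.isIn w (PySem.Str.lower text)) then some v else st.2
        (f, p))
      = (fun (st : Option String × Option String) v =>
        (if st.1.isNone && (fun v => PySem.Str.isIn (PySem.Str.lower v) (PySem.Str.lower text)) v
            then some v else st.1,
         if st.2.isNone && (fun v => (((PySem.Str.split? (PySem.Str.lower v) "_").getD [])).any
            (fun w => PySem.Str.isIn w (PySem.Str.lower text))) v then some v else st.2)) from rfl]
  rw [mev_fold_eq]
  simp [Option.orElse]

-- ===== VERDICT (by name: the statement is the Claim_ definition above) =====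
theorem match_enum_values_spec : Claim_equal_match_enum_values := by
  intro text enum_values _
  unfold Spec_match_enum_values
  exact (mev_alt_eq text enum_values).symm
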